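-- pv_equiv track=rewrite | github.com/bamboosingsinwind/interview | zhiyuan/tt-0829.py | solve
-- ===== SOURCE A (Python) =====
-- def count_subsets_greater_than_target(arr, target):
--     def backtrack(index, current_sum):
--         if current_sum > target:
--             return 1  # 当前子集满足条件，返回1
--         if index == len(arr):
--             return 0  # 已经遍历完所有元素，返回0
--
--         # 选择当前元素或不选择当前元素
--         include_count = backtrack(index + 1, current_sum + arr[index])
--         exclude_count = backtrack(index + 1, current_sum)
--
--         return include_count + exclude_count
--
--     return backtrack(0, 0)
--
-- def solve(arr):
--     res = []
--     for i in range(len(arr)):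
--         target = -arr[i]
--         arr1 = arr[:i] + arr[i+1:]
--         count = 1 if arr[i] >=0 else 0
--         count += count_subsets_greater_than_target(arr1, target)
--         res.append(count)
--     return res
-- ===== SOURCE B (Python) =====
-- def solve(arr):
--     res = []
--     for i in range(len(arr)):
--         target = -arr[i]
--         rest = arr[:i] + arr[i+1:]
--         count = 1 if arr[i] >= 0 else 0
--         if 0 > target:
--             count += 1
--             frontier = {}
--         else:
--             frontier = {0: 1}
--         for a in rest:
--             nxt = {}
--             for s, m in frontier.items():
--                 for t in (s + a, s):
--                     if t > target:
--                         count += m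
--                     else:
--                         nxt[t] = nxt.get(t, 0) + m
--             frontier = nxt
--         res.append(count)
--     return res
-- ===== Notes on version B (the rewrite author's own statement) =====
-- stated objective: alternative
-- what changed: Replaced A's recursive DFS over the subset tree (one call per node) by an iterative level-by-level DP that carries a dict mapping each reachable partial sum (still <= target) to its multiplicity, adding the multiplicities of pruned branches to the count; equal partial sums are merged instead of being explored separately.
import Mathlib
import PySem

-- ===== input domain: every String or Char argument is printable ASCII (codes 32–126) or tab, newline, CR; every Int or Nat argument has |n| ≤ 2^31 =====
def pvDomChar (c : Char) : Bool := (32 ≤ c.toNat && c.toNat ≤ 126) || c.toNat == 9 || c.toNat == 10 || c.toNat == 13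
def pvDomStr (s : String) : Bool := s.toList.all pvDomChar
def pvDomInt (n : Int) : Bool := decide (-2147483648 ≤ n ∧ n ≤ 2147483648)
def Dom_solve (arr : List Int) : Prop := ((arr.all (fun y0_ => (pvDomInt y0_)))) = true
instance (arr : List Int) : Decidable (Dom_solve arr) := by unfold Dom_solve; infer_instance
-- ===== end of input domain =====

-- B replaces A's recursive DFS over the subset tree by a level-by-level DP that carries a
-- dict from reachable partial sum to multiplicity, adding multiplicities of pruned branches
-- to the count; same return value, different algorithm (alternative decomposition).

-- ===== PORT A =====
def backtrackA (target : Int) (l : List Int) (s : Int) : Int :=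
  if s > target then 1
  else match l with
    | [] => 0
    | a :: tl => backtrackA target tl (s + a) + backtrackA target tl s

def count_subsets_greater_than_target (arr : List Int) (target : Int) : Int :=
  backtrackA target arr 0

def solve (arr : List Int) : List Int :=
  (PySem.List.pyRange 0 arr.length 1).foldl (fun res i =>
    let target := -(PySem.List.pyGetD arr i 0)
    let arr1 := PySem.List.slice arr none (some i) ++ PySem.List.slice arr (some (i + 1)) none
    let count : Int := if PySem.List.pyGetD arr i 0 ≥ 0 then 1 else 0
    let count := count + count_subsets_greater_than_target arr1 target
    res ++ [count]) []

-- ===== PORT B =====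
-- one level of the DP: fold over the frontier dict's items, splitting each sum s into s+a and s
def stepB (target : Int) (st : Int × PySem.Dict Int Int) (a : Int) : Int × PySem.Dict Int Int :=
  st.2.items.foldl (fun st2 p =>
    [p.1 + a, p.1].foldl (fun st3 t =>
      if t > target then (st3.1 + p.2, st3.2)
      else (st3.1, st3.2.insert t (st3.2.getD t 0 + p.2))) st2)
    (st.1, PySem.Dict.empty)

def solve_alt (arr : List Int) : List Int :=
  (PySem.List.pyRange 0 arr.length 1).foldl (fun res i =>
    let target := -(PySem.List.pyGetD arr i 0)
    let rest := PySem.List.slice arr none (some i) ++ PySem.List.slice arr (some (i + 1)) none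
    let count0 : Int := if PySem.List.pyGetD arr i 0 ≥ 0 then 1 else 0
    let init : Int × PySem.Dict Int Int :=
      if 0 > target then (count0 + 1, PySem.Dict.empty)
      else (count0, PySem.Dict.empty.insert 0 1)
    let fin := rest.foldl (stepB target) init
    res ++ [fin.1]) []

-- ===== PRECONDITION & SPEC =====
def Spec_solve (arr : List Int) (out : List Int) : Prop := out = solve_alt arr
instance (arr : List Int) (out : List Int) : Decidable (Spec_solve arr out) := by unfold Spec_solve; infer_instance

-- ===== CLAIM (what is proved, stated in full; the proofs are below) =====
def Claim_equal_solve : Prop := ∀ (arr : List Int), Dom_solve arr → Spec_solve arr (solve arr)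

-- ===== LEMMAS AND PROOFS =====

-- weighted sum of f over a dict's items, weights = values
def dictSum (d : PySem.Dict Int Int) (f : Int → Int) : Int :=
  (d.items.map (fun p => p.2 * f p.1)).sum

lemma sum_map_replace (l : List (Int × Int)) (t v m : Int) (f : Int → Int)
    (hnd : (l.map Prod.fst).Nodup) (hv : (t, v) ∈ l) :
    ((l.map (fun p => if p.1 == t then (t, v + m) else p)).map (fun p => p.2 * f p.1)).sum
      = (l.map (fun p => p.2 * f p.1)).sum + m * f t := by
  induction l with
  | nil => simp at hv
  | cons p l ih =>
    simp only [List.map_cons, List.nodup_cons] at hnd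
    rcases List.mem_cons.mp hv with hv | hv
    · subst hv
      have hrepl : l.map (fun q => if q.1 == t then (t, v + m) else q) = l.map id := by
        apply List.map_congr_left
        intro q hq
        have hne : q.1 ≠ t := by
          intro h
          exact hnd.1 (by rw [← h]; exact List.mem_map.mpr ⟨q, hq, rfl⟩)
        simp [hne]
      rw [List.map_cons, if_pos (by simp), hrepl, List.map_id, List.map_cons, List.sum_cons,
          List.map_cons, List.sum_cons]
      ring
    · have hne : p.1 ≠ t := by
        intro h
        exact hnd.1 (by rw [h]; exact List.mem_map.mpr ⟨(t, v), hv, rfl⟩)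
      rw [List.map_cons, if_neg (by simpa using hne), List.map_cons, List.sum_cons,
          List.map_cons, List.sum_cons, ih hnd.2 hv]
      ring

lemma dictSum_bump (d : PySem.Dict Int Int) (t m : Int) (f : Int → Int)
    (hnd : d.keys.Nodup) :
    dictSum (d.insert t (d.getD t 0 + m)) f = dictSum d f + m * f t := by
  by_cases hc : d.contains t = true
  · have hget : d.get? t = some (d.getD t 0) := by
      rw [PySem.Dict.contains_eq_isSome_get?] at hc
      cases hg : d.get? t with
      | none => rw [hg] at hc; simp at hc
      | some v => rw [PySem.Dict.getD_of_get?_eq_some d 0 hg]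
    have hmem : (t, d.getD t 0) ∈ d.items := PySem.Dict.mem_items_of_get?_eq_some d hget
    unfold dictSum
    rw [PySem.Dict.items_insert_of_contains d _ hc]
    exact sum_map_replace d.items t (d.getD t 0) m f hnd hmem
  · have hc' : d.contains t = false := by simpa using hc
    unfold dictSum
    rw [PySem.Dict.items_insert_of_not_contains d _ hc', PySem.Dict.getD_of_not_contains d 0 hc']
    simp only [List.map_append, List.sum_append, List.map_cons, List.map_nil,
      List.sum_cons, List.sum_nil, zero_add, add_zero]

lemma dictSum_zero (d : PySem.Dict Int Int) (f : Int → Int)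
    (h : ∀ k ∈ d.keys, f k = 0) : dictSum d f = 0 := by
  unfold dictSum
  apply List.sum_eq_zero
  intro x hx
  rcases List.mem_map.mp hx with ⟨p, hp, rfl⟩
  rw [h p.1 (PySem.Dict.mem_keys_of_mem_items d hp), mul_zero]

lemma dictSum_empty (f : Int → Int) : dictSum PySem.Dict.empty f = 0 := rfl

-- backtrackA returns 1 the moment the sum exceeds the target
lemma backtrackA_of_gt (target : Int) (l : List Int) (s : Int) (h : s > target) :
    backtrackA target l s = 1 := by
  cases l <;> simp [backtrackA, h]

lemma backtrackA_cons (target a : Int) (tl : List Int) (s : Int) (h : ¬ s > target) :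
    backtrackA target (a :: tl) s = backtrackA target tl (s + a) + backtrackA target tl s := by
  simp [backtrackA, h]

-- one candidate sum t of the inner loop body preserves count + dictSum, adding p.2 * f t
lemma one_step (target : Int) (f : Int → Int) (hf : ∀ t, t > target → f t = 1)
    (w : Int) (c : Int) (d : PySem.Dict Int Int) (hnd : d.keys.Nodup) (t : Int) :
    ((if t > target then (c + w, d) else (c, d.insert t (d.getD t 0 + w))) : Int × PySem.Dict Int Int).1
        + dictSum (if t > target then (c + w, d) else (c, d.insert t (d.getD t 0 + w))).2 f
      = c + dictSum d f + w * f t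
    ∧ (if t > target then (c + w, d) else (c, d.insert t (d.getD t 0 + w))).2.keys.Nodup
    ∧ ∀ k ∈ (if t > target then (c + w, d) else (c, d.insert t (d.getD t 0 + w))).2.keys,
        k ≤ target ∨ k ∈ d.keys := by
  by_cases ht : t > target
  · rw [if_pos ht]
    refine ⟨?_, hnd, fun k hk => Or.inr hk⟩
    show c + w + dictSum d f = c + dictSum d f + w * f t
    rw [hf t ht]; ring
  · rw [if_neg ht]
    refine ⟨?_, PySem.Dict.nodup_keys_insert d t _ hnd, ?_⟩
    · show c + dictSum (d.insert t (d.getD t 0 + w)) f = c + dictSum d f + w * f t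
      rw [dictSum_bump d t w f hnd]
      ring
    · intro k hk
      rcases (PySem.Dict.mem_keys_insert d t k _).mp hk with rfl | hk2
      · exact Or.inl (by omega)
      · exact Or.inr hk2

-- the inner fold over the frontier's items preserves count + dictSum, adding each item's two children
lemma inner_fold (target a : Int) (f : Int → Int) (hf : ∀ t, t > target → f t = 1)
    (P : List (Int × Int)) (c : Int) (d : PySem.Dict Int Int) (hnd : d.keys.Nodup) :
    (P.foldl (fun st2 p =>
        [p.1 + a, p.1].foldl (fun st3 t =>
          if t > target then (st3.1 + p.2, st3.2)
          else (st3.1, st3.2.insert t (st3.2.getD t 0 + p.2))) st2) (c, d)).1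
      + dictSum (P.foldl (fun st2 p =>
        [p.1 + a, p.1].foldl (fun st3 t =>
          if t > target then (st3.1 + p.2, st3.2)
          else (st3.1, st3.2.insert t (st3.2.getD t 0 + p.2))) st2) (c, d)).2 f
        = c + dictSum d f + (P.map (fun p => p.2 * (f (p.1 + a) + f p.1))).sum
      ∧ (P.foldl (fun st2 p =>
        [p.1 + a, p.1].foldl (fun st3 t =>
          if t > target then (st3.1 + p.2, st3.2)
          else (st3.1, st3.2.insert t (st3.2.getD t 0 + p.2))) st2) (c, d)).2.keys.Nodup
      ∧ ∀ k ∈ (P.foldl (fun st2 p =>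
        [p.1 + a, p.1].foldl (fun st3 t =>
          if t > target then (st3.1 + p.2, st3.2)
          else (st3.1, st3.2.insert t (st3.2.getD t 0 + p.2))) st2) (c, d)).2.keys,
          k ≤ target ∨ k ∈ d.keys := by
  induction P generalizing c d with
  | nil => exact ⟨by simp, hnd, fun k hk => Or.inr hk⟩
  | cons p P ih =>
    obtain ⟨e1, n1, s1⟩ := one_step target f hf p.2 c d hnd (p.1 + a)
    obtain ⟨e2, n2, s2⟩ := one_step target f hf p.2
      (if p.1 + a > target then (c + p.2, d) else (c, d.insert (p.1 + a) (d.getD (p.1 + a) 0 + p.2))).1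
      (if p.1 + a > target then (c + p.2, d) else (c, d.insert (p.1 + a) (d.getD (p.1 + a) 0 + p.2))).2
      n1 p.1
    obtain ⟨e3, n3, s3⟩ := ih
      (if p.1 > target
        then ((if p.1 + a > target then (c + p.2, d) else (c, d.insert (p.1 + a) (d.getD (p.1 + a) 0 + p.2))).1 + p.2,
              (if p.1 + a > target then (c + p.2, d) else (c, d.insert (p.1 + a) (d.getD (p.1 + a) 0 + p.2))).2)
        else ((if p.1 + a > target then (c + p.2, d) else (c, d.insert (p.1 + a) (d.getD (p.1 + a) 0 + p.2))).1,
              (if p.1 + a > target then (c + p.2, d) else (c, d.insert (p.1 + a) (d.getD (p.1 + a) 0 + p.2))).2.insert p.1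
                ((if p.1 + a > target then (c + p.2, d) else (c, d.insert (p.1 + a) (d.getD (p.1 + a) 0 + p.2))).2.getD p.1 0 + p.2))).1
      (if p.1 > target
        then ((if p.1 + a > target then (c + p.2, d) else (c, d.insert (p.1 + a) (d.getD (p.1 + a) 0 + p.2))).1 + p.2,
              (if p.1 + a > target then (c + p.2, d) else (c, d.insert (p.1 + a) (d.getD (p.1 + a) 0 + p.2))).2)
        else ((if p.1 + a > target then (c + p.2, d) else (c, d.insert (p.1 + a) (d.getD (p.1 + a) 0 + p.2))).1,
              (if p.1 + a > target then (c + p.2, d) else (c, d.insert (p.1 + a) (d.getD (p.1 + a) 0 + p.2))).2.insert p.1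
                ((if p.1 + a > target then (c + p.2, d) else (c, d.insert (p.1 + a) (d.getD (p.1 + a) 0 + p.2))).2.getD p.1 0 + p.2))).2
      n2
    refine ⟨?_, n3, ?_⟩
    · refine Eq.trans e3 ?_
      rw [e2, e1, List.map_cons, List.sum_cons]
      ring
    · intro k hk
      rcases s3 k hk with h | h
      · exact Or.inl h
      · rcases s2 k h with h2 | h2
        · exact Or.inl h2
        · exact s1 k h2

-- the whole DP fold computes backtrackA weighted over the frontier
lemma main_fold (target : Int) (rest : List Int) (c : Int) (d : PySem.Dict Int Int)
    (hnd : d.keys.Nodup) (hle : ∀ k ∈ d.keys, k ≤ target) :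
    (rest.foldl (stepB target) (c, d)).1
      = c + dictSum d (fun s => backtrackA target rest s) := by
  induction rest generalizing c d with
  | nil =>
    simp only [List.foldl_nil]
    rw [dictSum_zero _ _ (fun k hk => by
      have hk' : ¬ k > target := not_lt.mpr (hle k hk)
      simp [backtrackA, hk'])]
    ring
  | cons a tl ih =>
    simp only [List.foldl_cons]
    obtain ⟨he, hn, hs⟩ := inner_fold target a (fun s => backtrackA target tl s)
      (fun t ht => backtrackA_of_gt target tl t ht) d.items c PySem.Dict.empty
      PySem.Dict.nodup_keys_empty
    have hle2 : ∀ k ∈ (stepB target (c, d) a).2.keys, k ≤ target := by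
      intro k hk
      rcases hs k hk with h | h
      · exact h
      · simp [PySem.Dict.keys_empty] at h
    refine Eq.trans (ih (stepB target (c, d) a).1 (stepB target (c, d) a).2 hn hle2) ?_
    refine Eq.trans he ?_
    have hsum : (d.items.map (fun p =>
          p.2 * (backtrackA target tl (p.1 + a) + backtrackA target tl p.1))).sum
        = dictSum d (fun s => backtrackA target (a :: tl) s) := by
      unfold dictSum
      apply congrArg
      apply List.map_congr_left
      intro p hp
      have hkey : p.1 ≤ target := hle p.1 (PySem.Dict.mem_keys_of_mem_items d hp)
      show p.2 * (backtrackA target tl (p.1 + a) + backtrackA target tl p.1)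
          = p.2 * backtrackA target (a :: tl) p.1
      rw [backtrackA_cons target a tl p.1 (not_lt.mpr hkey)]
    simp only [dictSum_empty, add_zero]
    rw [← hsum]

-- per-index equality of the two programs' appended value
lemma per_index (target : Int) (rest : List Int) (count0 : Int) :
    (rest.foldl (stepB target)
        (if 0 > target then (count0 + 1, (PySem.Dict.empty : PySem.Dict Int Int))
         else (count0, PySem.Dict.empty.insert 0 1))).1
      = count0 + count_subsets_greater_than_target rest target := by
  unfold count_subsets_greater_than_target
  by_cases h : (0 : Int) > target
  · rw [if_pos h, main_fold target rest _ _ PySem.Dict.nodup_keys_empty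
      (fun k hk => by simp [PySem.Dict.keys_empty] at hk)]
    rw [dictSum_empty, backtrackA_of_gt target rest 0 h]
    ring
  · rw [if_neg h, main_fold target rest _ _
      (PySem.Dict.nodup_keys_insert PySem.Dict.empty 0 1 PySem.Dict.nodup_keys_empty)
      (fun k hk => by
        rcases (PySem.Dict.mem_keys_insert PySem.Dict.empty 0 k 1).mp hk with rfl | hk2
        · omega
        · simp [PySem.Dict.keys_empty] at hk2)]
    have hone : dictSum (PySem.Dict.empty.insert 0 1) (fun s => backtrackA target rest s)
        = backtrackA target rest 0 := by
      unfold dictSum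
      rw [PySem.Dict.items_insert_of_not_contains PySem.Dict.empty 1 (by simp)]
      show ((([] : List (Int × Int)) ++ [((0 : Int), (1 : Int))]).map
          (fun p => p.2 * backtrackA target rest p.1)).sum = backtrackA target rest 0
      simp
    rw [hone]

-- ===== VERDICT (by name: the statement is the Claim_ definition above) =====
theorem solve_spec : Claim_equal_solve := by
  intro arr _
  unfold Spec_solve solve solve_alt
  rw [PySem.List.foldl_append_singleton_eq_map, PySem.List.foldl_append_singleton_eq_map,
      List.nil_append, List.nil_append]
  apply List.map_congr_left
  intro i _
  dsimp only
  rw [per_index]
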